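-- pv_equiv track=rewrite | github.com/JuneHou/CausalError | benchmarking/_clustered_patch/action_primitive_library.py | _collect_descendant_span_ids
-- ===== SOURCE A (Python) =====
-- from typing import Any, Dict, List, Optional, Tuple
--
-- def _collect_descendant_span_ids(step_span_id: str, parent_of: Dict[str, str]) -> List[str]:
--     """Return all span_ids that have step_span_id as ancestor (step plus all descendants)."""
--     out = [step_span_id]
--     added = {step_span_id}
--     while True:
--         more = [sid for sid, pid in parent_of.items() if pid in added and sid not in added]
--         if not more:
--             break
--         for sid in more:
--             added.add(sid)
--             out.append(sid)
--     return out
-- ===== SOURCE B (Python) =====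
-- def _collect_descendant_span_ids(step_span_id, parent_of):
--     """Return all span_ids that have step_span_id as ancestor (step plus all descendants)."""
--     children = {}
--     index = {}
--     for i, (sid, pid) in enumerate(parent_of.items()):
--         index[sid] = i
--         children.setdefault(pid, []).append(sid)
--     out = [step_span_id]
--     seen = {step_span_id}
--     frontier = [step_span_id]
--     while frontier:
--         nxt = []
--         for node in frontier:
--             for child in children.get(node, []):
--                 if child not in seen:
--                     seen.add(child)
--                     nxt.append(child)
--         nxt.sort(key=index.__getitem__)
--         out += nxt
--         frontier = nxt
--     return out
-- ===== Notes on version B (the rewrite author's own statement) =====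
-- stated objective: alternative
-- what changed: B builds a children adjacency map and a key-index map once and walks the tree level by level (BFS over the adjacency map, each level sorted by dict index) instead of rescanning every dict entry against the accumulated set on every round like A.
import Mathlib
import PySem

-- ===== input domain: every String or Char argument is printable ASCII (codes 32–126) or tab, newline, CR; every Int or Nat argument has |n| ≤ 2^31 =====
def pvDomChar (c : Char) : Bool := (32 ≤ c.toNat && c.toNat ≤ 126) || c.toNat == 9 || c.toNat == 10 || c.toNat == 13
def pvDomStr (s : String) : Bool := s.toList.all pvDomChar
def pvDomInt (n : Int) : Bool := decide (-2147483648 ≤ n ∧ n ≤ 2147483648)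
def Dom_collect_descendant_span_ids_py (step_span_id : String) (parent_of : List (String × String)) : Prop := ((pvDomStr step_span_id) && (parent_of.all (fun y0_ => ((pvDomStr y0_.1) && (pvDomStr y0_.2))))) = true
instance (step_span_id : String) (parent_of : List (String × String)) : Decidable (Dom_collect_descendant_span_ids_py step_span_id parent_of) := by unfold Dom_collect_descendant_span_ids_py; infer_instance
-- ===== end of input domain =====

-- B replaces A's repeated full-dict rescans with a children adjacency map walked level by level,
-- each level ordered by a precomputed dict-index; equality of the returned list is proved below.

-- ===== PORT A =====
-- A's 'while True' loop. Each non-final round appends at least one distinct key of parent_of to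
-- 'added', so items.length + 1 iterations always reach the 'break'; fuel only makes the recursion
-- structural and is never exhausted before the natural exit.
def pvA_loop (items : List (String × String)) : Nat → List String → PySem.Set String → List String
  | 0, out, _ => out
  | fuel+1, out, added =>
    let more := (items.filter (fun p => PySem.Set.contains added p.2 && !PySem.Set.contains added p.1)).map Prod.fst
    if more.isEmpty then out
    else pvA_loop items fuel (out ++ more) (more.foldl PySem.Set.add added)

def pvB_round (children : PySem.Dict String (List String)) (frontier : List String)
    (seen : PySem.Set String) : List String × PySem.Set String :=
  frontier.foldl (fun st node =>
      (children.getD node []).foldl (fun st c =>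
          if PySem.Set.contains st.2 c then st else (st.1 ++ [c], PySem.Set.add st.2 c)) st)
    ([], seen)

def pvB_loop (children : PySem.Dict String (List String)) (index : PySem.Dict String Int) :
    Nat → List String → PySem.Set String → List String → List String
  | 0, out, _, _ => out
  | fuel+1, out, seen, frontier =>
    if frontier.isEmpty then out
    else
      let r := pvB_round children frontier seen
      let nxt := PySem.List.sorted r.1 (fun s => index.getD s 0)
      pvB_loop children index fuel (out ++ nxt) r.2 nxt


def collect_descendant_span_ids_py (step_span_id : String) (parent_of : List (String × String)) : List String :=
  let items := (PySem.Dict.ofList parent_of).items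
  pvA_loop items (items.length + 1) [step_span_id] (PySem.Set.ofList [step_span_id])

-- ===== PORT B =====
-- B: one pass over enumerate(parent_of.items()) builds the key-index dict and the children
-- adjacency dict; then a BFS over the children map, each level sorted by dict index.
-- The 'while frontier' loop runs at most items.length + 2 times (fuel, as above, never exhausted).

def collect_descendant_span_ids_py_alt (step_span_id : String) (parent_of : List (String × String)) : List String :=
  let items := (PySem.Dict.ofList parent_of).items
  let ic := (PySem.List.enumerate items).foldl
      (fun st p => (st.1.insert p.2.1 p.1, st.2.modify p.2.2 [] (· ++ [p.2.1])))
      ((PySem.Dict.empty : PySem.Dict String Int), (PySem.Dict.empty : PySem.Dict String (List String)))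
  pvB_loop ic.2 ic.1 (items.length + 2) [step_span_id] (PySem.Set.ofList [step_span_id]) [step_span_id]

-- ===== PRECONDITION & SPEC =====
def Spec_collect_descendant_span_ids_py (step_span_id : String) (parent_of : List (String × String)) (out : List String) : Prop := out = collect_descendant_span_ids_py_alt step_span_id parent_of
instance (step_span_id : String) (parent_of : List (String × String)) (out : List String) : Decidable (Spec_collect_descendant_span_ids_py step_span_id parent_of out) := by unfold Spec_collect_descendant_span_ids_py; infer_instance

-- ===== CLAIM (what is proved, stated in full; the proofs are below) =====
def Claim_equal_collect_descendant_span_ids_py : Prop := ∀ (step_span_id : String) (parent_of : List (String × String)), Dom_collect_descendant_span_ids_py step_span_id parent_of → Spec_collect_descendant_span_ids_py step_span_id parent_of (collect_descendant_span_ids_py step_span_id parent_of)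

-- ===== LEMMAS AND PROOFS =====

-- the invariant tying A's loop state to B's loop state (added/seen agree as sets, the frontier is
-- the last level, and every key whose parent was added before the last level is itself added)
def pvInv (items : List (String × String)) (added seen frontier : List String) : Prop :=
  frontier.Nodup ∧
  (∀ x ∈ frontier, x ∈ added) ∧
  (∀ x, x ∈ seen ↔ x ∈ added) ∧
  (∀ s p, (s, p) ∈ items → p ∈ added → p ∉ frontier → s ∈ added)


theorem pv_pairwise_idxOf {α : Type} [BEq α] [LawfulBEq α] {l : List α} (h : l.Nodup) :
    l.Pairwise (fun a b => l.idxOf a < l.idxOf b) := by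
  induction l with
  | nil => exact List.Pairwise.nil
  | cons x t ih =>
    rcases List.nodup_cons.mp h with ⟨hx, ht⟩
    refine List.pairwise_cons.mpr ⟨?_, ?_⟩
    · intro b hb
      have hbx : b ≠ x := fun e => hx (e ▸ hb)
      rw [List.idxOf_cons_self, List.idxOf_cons_ne t (Ne.symm hbx)]
      omega
    · refine (ih ht).imp_of_mem ?_
      intro a b ha hb hlt
      have hax : a ≠ x := fun e => hx (e ▸ ha)
      have hbx : b ≠ x := fun e => hx (e ▸ hb)
      rw [List.idxOf_cons_ne t (Ne.symm hax), List.idxOf_cons_ne t (Ne.symm hbx)]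
      omega

theorem pv_mem_foldl_add {α : Type} [BEq α] [LawfulBEq α] (l : List α) (s : PySem.Set α) (x : α) :
    x ∈ l.foldl PySem.Set.add s ↔ x ∈ s ∨ x ∈ l := by
  induction l generalizing s with
  | nil => simp
  | cons c t ih =>
    simp only [List.foldl_cons, ih, PySem.Set.mem_add, List.mem_cons]
    tauto

theorem pv_thread {α : Type} [BEq α] [LawfulBEq α] (cs : List α) :
    ∀ (acc : List α) (seen : PySem.Set α), cs.Nodup →
    cs.foldl (fun st c => if PySem.Set.contains st.2 c then st else (st.1 ++ [c], PySem.Set.add st.2 c)) (acc, seen)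
      = (acc ++ cs.filter (fun c => !PySem.Set.contains seen c), cs.foldl PySem.Set.add seen) := by
  induction cs with
  | nil => simp
  | cons c t ih =>
    intro acc seen hnd
    rcases List.nodup_cons.mp hnd with ⟨hc, ht⟩
    by_cases h : PySem.Set.contains seen c
    · have hadd : PySem.Set.add seen c = seen := by unfold PySem.Set.add; rw [if_pos h]
      rw [List.foldl_cons, List.foldl_cons,
        if_pos (show PySem.Set.contains ((acc, seen) : List α × PySem.Set α).2 c = true from h),
        ih acc seen ht, hadd, List.filter_cons]
      simp [(PySem.Set.contains_iff seen c).mp h]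
    · rw [List.foldl_cons, List.foldl_cons,
        if_neg (show ¬ PySem.Set.contains ((acc, seen) : List α × PySem.Set α).2 c = true from h),
        ih (acc ++ [c]) (PySem.Set.add seen c) ht, List.filter_cons]
      have hfilter : t.filter (fun x => !PySem.Set.contains (PySem.Set.add seen c) x)
          = t.filter (fun x => !PySem.Set.contains seen x) := by
        refine List.filter_congr ?_
        intro x hx
        have hxc : x ≠ c := fun e => hc (e ▸ hx)
        have hcx : PySem.Set.contains (PySem.Set.add seen c) x = PySem.Set.contains seen x := by
          rw [Bool.eq_iff_iff, PySem.Set.contains_iff, PySem.Set.contains_iff, PySem.Set.mem_add]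
          constructor
          · rintro (hmem | rfl)
            · exact hmem
            · exact absurd rfl hxc
          · exact Or.inl
        rw [hcx]
      rw [hfilter]
      have hnm : c ∉ seen := fun hm => h ((PySem.Set.contains_iff seen c).mpr hm)
      simp [hnm, List.append_assoc]

theorem pv_foldl_flatMap {α β σ : Type} (l : List α) (g : α → List β) (f : σ → β → σ) :
    ∀ (i : σ), (l.flatMap g).foldl f i = l.foldl (fun a x => (g x).foldl f a) i := by
  induction l with
  | nil => intro i; simp
  | cons x t ih => intro i; simp [List.flatMap_cons, List.foldl_append, ih]

theorem pv_unique {items : List (String × String)} (hK : (items.map Prod.fst).Nodup)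
    {s p1 p2 : String} (h1 : (s, p1) ∈ items) (h2 : (s, p2) ∈ items) : p1 = p2 := by
  induction items with
  | nil => cases h1
  | cons a t ih =>
    simp only [List.map_cons, List.nodup_cons] at hK
    rcases hK with ⟨ha, ht⟩
    rcases List.mem_cons.mp h1 with h1 | h1 <;> rcases List.mem_cons.mp h2 with h2 | h2
    · exact congrArg Prod.snd (h1.trans h2.symm)
    · exfalso
      apply ha
      have : Prod.fst (s, p2) ∈ t.map Prod.fst := List.mem_map_of_mem h2
      rw [← h1]
      exact this
    · exfalso
      apply ha
      have : Prod.fst (s, p1) ∈ t.map Prod.fst := List.mem_map_of_mem h1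
      rw [← h2]
      exact this
    · exact ih ht h1 h2

theorem pv_filter_le {α : Type} (l : List α) (p q : α → Bool)
    (himp : ∀ x ∈ l, q x → p x) :
    (l.filter q).length ≤ (l.filter p).length := by
  induction l with
  | nil => simp
  | cons a t ih =>
    have hle := ih (fun y hy => himp y (List.mem_cons_of_mem _ hy))
    simp only [List.filter_cons]
    by_cases hqa : q a
    · rw [if_pos hqa, if_pos (himp a List.mem_cons_self hqa)]
      simpa using hle
    · rw [if_neg (by simpa using hqa)]
      by_cases hpa : p a
      · rw [if_pos hpa]; simp; omega
      · rw [if_neg (by simpa using hpa)]; exact hle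

theorem pv_filter_lt {α : Type} (l : List α) (p q : α → Bool)
    (himp : ∀ x ∈ l, q x → p x) (hw : ∃ x ∈ l, p x ∧ ¬ q x) :
    (l.filter q).length < (l.filter p).length := by
  induction l with
  | nil => rcases hw with ⟨x, hx, _⟩; cases hx
  | cons a t ih =>
    rcases hw with ⟨x, hx, hpx, hqx⟩
    simp only [List.filter_cons]
    rcases List.mem_cons.mp hx with rfl | hxt
    · have hle := pv_filter_le t p q (fun y hy => himp y (List.mem_cons_of_mem _ hy))
      rw [if_pos hpx, if_neg (by simpa using hqx)]
      simp; omega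
    · have hlt := ih (fun y hy => himp y (List.mem_cons_of_mem _ hy)) ⟨x, hxt, hpx, hqx⟩
      by_cases hqa : q a
      · rw [if_pos hqa, if_pos (himp a List.mem_cons_self hqa)]
        simpa using hlt
      · rw [if_neg (by simpa using hqa)]
        by_cases hpa : p a
        · rw [if_pos hpa]; simp; omega
        · rw [if_neg (by simpa using hpa)]; exact hlt

theorem pv_idx_notouch (l : List (Int × (String × String))) (s : String) :
    ∀ (d : PySem.Dict String Int), (∀ q ∈ l, q.2.1 ≠ s) →
    (l.foldl (fun d p => d.insert p.2.1 p.1) d).getD s 0 = d.getD s 0 := by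
  induction l with
  | nil => intro d _; rfl
  | cons q t ih =>
    intro d h
    rw [List.foldl_cons, ih _ (fun r hr => h r (List.mem_cons_of_mem _ hr))]
    exact PySem.Dict.getD_insert_of_ne d _ _ (Ne.symm (h q List.mem_cons_self))

theorem pv_idx (its : List (String × String)) :
    ∀ (n : Int) (d : PySem.Dict String Int), (its.map Prod.fst).Nodup →
    ∀ s ∈ its.map Prod.fst,
      ((PySem.List.enumerate its n).foldl (fun d p => d.insert p.2.1 p.1) d).getD s 0
        = n + ((its.map Prod.fst).idxOf s : Int) := by
  induction its with
  | nil => intro n d _ s hs; cases hs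
  | cons a t ih =>
    intro n d hnd s hs
    simp only [List.map_cons, List.nodup_cons] at hnd
    rcases hnd with ⟨ha, ht⟩
    rw [PySem.List.enumerate_cons, List.foldl_cons]
    rcases List.mem_cons.mp hs with rfl | hst
    · have hnt : ∀ q ∈ PySem.List.enumerate t (n + 1), q.2.1 ≠ a.1 := by
        intro q hq
        rcases (PySem.List.mem_enumerate_iff t (n+1) q).mp hq with ⟨k, hk, rfl⟩
        intro e
        exact ha (e ▸ List.mem_map_of_mem (List.getElem_mem hk))
      rw [pv_idx_notouch _ _ _ hnt, PySem.Dict.getD_insert_self]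
      simp [List.idxOf_cons_self]
    · have hsa : s ≠ a.1 := fun e => ha (e ▸ hst)
      rw [ih (n+1) (d.insert a.1 n) ht s hst, List.map_cons, List.idxOf_cons_ne _ (Ne.symm hsa)]
      push_cast
      ring

theorem pv_children (its : List (String × String)) (c : String) :
    ((PySem.List.enumerate its).foldl (fun d p => d.modify p.2.2 [] (· ++ [p.2.1])) PySem.Dict.empty).getD c []
      = (its.filter (fun p => p.2 == c)).map Prod.fst := by
  have h1 : (PySem.List.enumerate its).foldl (fun d p => d.modify p.2.2 [] (· ++ [p.2.1])) PySem.Dict.empty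
      = its.foldl (fun d p => d.modify p.2 [] (· ++ [p.1])) PySem.Dict.empty := by
    conv_rhs => rw [← PySem.List.map_snd_enumerate its 0, List.foldl_map]
  have h2 : its.foldl (fun d p => d.modify p.2 [] (· ++ [p.1])) PySem.Dict.empty
      = (its.map Prod.swap).foldl (fun d p => d.modify p.1 [] (· ++ [p.2])) PySem.Dict.empty := by
    rw [List.foldl_map]
    rfl
  rw [h1, h2, PySem.Dict.getD_foldl_modify_append]
  rw [List.filter_map]
  have h3 : ((fun p => p.1 == c) ∘ (Prod.swap : String × String → String × String)) = fun p => p.2 == c := rfl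
  rw [h3, List.map_map]
  simp [Function.comp, Prod.swap, PySem.Dict.getD_empty]

theorem pv_group_mem (its : List (String × String)) (c s : String) :
    s ∈ (its.filter (fun p => p.2 == c)).map Prod.fst ↔ (s, c) ∈ its := by
  simp only [List.mem_map, List.mem_filter]
  constructor
  · rintro ⟨⟨s', c'⟩, ⟨hm, hc⟩, rfl⟩
    simp only [beq_iff_eq] at hc
    subst hc
    exact hm
  · intro h
    exact ⟨(s, c), ⟨h, by simp⟩, rfl⟩

theorem pv_G_nodup (its : List (String × String)) (hK : (its.map Prod.fst).Nodup) (c : String) :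
    ((its.filter (fun p => p.2 == c)).map Prod.fst).Nodup :=
  ((List.filter_sublist).map Prod.fst).nodup hK

theorem pv_cs_mem (its : List (String × String)) (children : PySem.Dict String (List String))
    (hch : ∀ c, children.getD c [] = (its.filter (fun p => p.2 == c)).map Prod.fst)
    (frontier : List String) (s : String) :
    s ∈ frontier.flatMap (fun node => children.getD node []) ↔ ∃ p ∈ frontier, (s, p) ∈ its := by
  simp only [List.mem_flatMap, hch, pv_group_mem]

theorem pv_cs_nodup (its : List (String × String)) (hK : (its.map Prod.fst).Nodup)
    (children : PySem.Dict String (List String))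
    (hch : ∀ c, children.getD c [] = (its.filter (fun p => p.2 == c)).map Prod.fst)
    (frontier : List String) (hf : frontier.Nodup) :
    (frontier.flatMap (fun node => children.getD node [])).Nodup := by
  induction frontier with
  | nil => simp
  | cons f t ih =>
    rcases List.nodup_cons.mp hf with ⟨hft, ht⟩
    rw [List.flatMap_cons]
    refine List.Nodup.append ?_ (ih ht) ?_
    · rw [hch]; exact pv_G_nodup its hK f
    · intro x hx1 hx2
      rw [hch] at hx1
      have h1 : (x, f) ∈ its := (pv_group_mem its f x).mp hx1
      rcases (pv_cs_mem its children hch t x).mp hx2 with ⟨p, hp, h2⟩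
      exact hft ((pv_unique hK h1 h2) ▸ hp)

theorem pv_contains_false {α : Type} [BEq α] [LawfulBEq α] (s : PySem.Set α) (x : α) :
    PySem.Set.contains s x = false ↔ x ∉ s := by
  cases h : PySem.Set.contains s x <;> simp_all

theorem pv_lcontains_false {α : Type} [BEq α] [LawfulBEq α] (L : List α) (x : α) :
    L.contains x = false ↔ x ∉ L :=
  pv_contains_false L x

theorem pv_more_mem (its : List (String × String)) (added : List String) (s : String) :
    s ∈ (its.filter (fun p => PySem.Set.contains added p.2 && !PySem.Set.contains added p.1)).map Prod.fst
      ↔ ∃ p, (s, p) ∈ its ∧ p ∈ added ∧ s ∉ added := by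
  simp only [List.mem_map, List.mem_filter, Bool.and_eq_true, Bool.not_eq_true',
    PySem.Set.contains_iff, pv_contains_false]
  constructor
  · rintro ⟨⟨s', p⟩, ⟨hm, hpa, hna⟩, rfl⟩
    exact ⟨p, hm, hpa, hna⟩
  · rintro ⟨p, hm, hpa, hna⟩
    exact ⟨(s, p), ⟨hm, hpa, hna⟩, rfl⟩

theorem pv_round
    (its : List (String × String)) (hK : (its.map Prod.fst).Nodup)
    (children : PySem.Dict String (List String)) (index : PySem.Dict String Int)
    (hch : ∀ c, children.getD c [] = (its.filter (fun p => p.2 == c)).map Prod.fst)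
    (hidx : ∀ s ∈ its.map Prod.fst, index.getD s 0 = ((its.map Prod.fst).idxOf s : Int))
    (added seen frontier : List String)
    (hinv : pvInv its added seen frontier) :
    PySem.List.sorted (pvB_round children frontier seen).1 (fun s => index.getD s 0)
        = (its.filter (fun p => PySem.Set.contains added p.2 && !PySem.Set.contains added p.1)).map Prod.fst
    ∧ ∀ x, x ∈ (pvB_round children frontier seen).2
        ↔ x ∈ seen ∨ x ∈ frontier.flatMap (fun node => children.getD node []) := by
  obtain ⟨hfnd, hfa, hsa, hcl⟩ := hinv
  have hcsnd := pv_cs_nodup its hK children hch frontier hfnd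
  have hr : pvB_round children frontier seen
      = ((frontier.flatMap (fun node => children.getD node [])).filter (fun c => !PySem.Set.contains seen c),
         (frontier.flatMap (fun node => children.getD node [])).foldl PySem.Set.add seen) := by
    unfold pvB_round
    rw [← pv_foldl_flatMap frontier (fun node => children.getD node []) _ ([], seen)]
    rw [pv_thread _ [] seen hcsnd]
    simp
  have hmsub : List.Sublist
      ((its.filter (fun p => PySem.Set.contains added p.2 && !PySem.Set.contains added p.1)).map Prod.fst)
      (its.map Prod.fst) := List.Sublist.map Prod.fst List.filter_sublist
  have hmnd := hmsub.nodup hK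
  have hperm : ((its.filter (fun p => PySem.Set.contains added p.2 && !PySem.Set.contains added p.1)).map Prod.fst).Perm
      ((frontier.flatMap (fun node => children.getD node [])).filter (fun c => !PySem.Set.contains seen c)) := by
    rw [List.perm_ext_iff_of_nodup hmnd (hcsnd.filter _)]
    intro a
    rw [pv_more_mem, List.mem_filter]
    constructor
    · rintro ⟨p, hm, hpa, hna⟩
      have hpf : p ∈ frontier := by
        by_contra hnf
        exact hna (hcl a p hm hpa hnf)
      refine ⟨(pv_cs_mem its children hch frontier a).mpr ⟨p, hpf, hm⟩, ?_⟩
      simp only [Bool.not_eq_true', pv_contains_false]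
      exact fun hx => hna ((hsa a).mp hx)
    · rintro ⟨hcs, hns⟩
      rcases (pv_cs_mem its children hch frontier a).mp hcs with ⟨p, hpf, hm⟩
      simp only [Bool.not_eq_true', pv_contains_false] at hns
      exact ⟨p, hm, hfa p hpf, fun hx => hns ((hsa a).mpr hx)⟩
  have hpair : ((its.filter (fun p => PySem.Set.contains added p.2 && !PySem.Set.contains added p.1)).map Prod.fst).Pairwise
      (fun a b => index.getD a 0 < index.getD b 0) := by
    refine (List.Pairwise.sublist hmsub (pv_pairwise_idxOf hK)).imp_of_mem ?_
    intro a b ha hb hlt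
    rw [hidx a (hmsub.subset ha), hidx b (hmsub.subset hb)]
    exact_mod_cast hlt
  constructor
  · rw [hr]
    exact PySem.List.sorted_eq_of_perm_of_pairwise_lt _ _ _ hperm hpair
  · intro x
    rw [hr]
    exact pv_mem_foldl_add _ seen x

theorem pvB_loop_nil (children : PySem.Dict String (List String)) (index : PySem.Dict String Int)
    (fuel : Nat) (out : List String) (seen : PySem.Set String) :
    pvB_loop children index fuel out seen [] = out := by
  cases fuel <;> simp [pvB_loop]

theorem pvA_loop_succ (items : List (String × String)) (f : Nat) (out : List String) (added : PySem.Set String) :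
    pvA_loop items (f+1) out added
      = if ((items.filter (fun p => PySem.Set.contains added p.2 && !PySem.Set.contains added p.1)).map Prod.fst).isEmpty
          then out
          else pvA_loop items f
            (out ++ (items.filter (fun p => PySem.Set.contains added p.2 && !PySem.Set.contains added p.1)).map Prod.fst)
            (((items.filter (fun p => PySem.Set.contains added p.2 && !PySem.Set.contains added p.1)).map Prod.fst).foldl PySem.Set.add added) := rfl

theorem pvB_loop_succ (children : PySem.Dict String (List String)) (index : PySem.Dict String Int)
    (f : Nat) (out : List String) (seen : PySem.Set String) (frontier : List String) :
    pvB_loop children index (f+1) out seen frontier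
      = if frontier.isEmpty then out
        else pvB_loop children index f
          (out ++ PySem.List.sorted (pvB_round children frontier seen).1 (fun s => index.getD s 0))
          (pvB_round children frontier seen).2
          (PySem.List.sorted (pvB_round children frontier seen).1 (fun s => index.getD s 0)) := rfl

theorem pv_main
    (its : List (String × String)) (hK : (its.map Prod.fst).Nodup)
    (children : PySem.Dict String (List String)) (index : PySem.Dict String Int)
    (hch : ∀ c, children.getD c [] = (its.filter (fun p => p.2 == c)).map Prod.fst)
    (hidx : ∀ s ∈ its.map Prod.fst, index.getD s 0 = ((its.map Prod.fst).idxOf s : Int)) :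
    ∀ (fuel : Nat) (out : List String) (added seen frontier : List String),
      pvInv its added seen frontier →
      ((its.map Prod.fst).filter (fun k => !added.contains k)).length + 1 ≤ fuel →
      pvA_loop its fuel out added = pvB_loop children index (fuel + 1) out seen frontier := by
  intro fuel
  induction fuel with
  | zero => intro out added seen frontier _ hb; omega
  | succ f ih =>
    intro out added seen frontier hinv hb
    obtain ⟨hsort, hseen⟩ := pv_round its hK children index hch hidx added seen frontier hinv
    obtain ⟨hfnd, hfa, hsa, hcl⟩ := hinv
    rw [pvA_loop_succ, pvB_loop_succ, hsort]
    by_cases hfe : frontier.isEmpty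
    · have hfnil : frontier = [] := List.isEmpty_iff.mp hfe
      have hmnil : (its.filter (fun p => PySem.Set.contains added p.2 && !PySem.Set.contains added p.1)).map Prod.fst = [] := by
        rw [← hsort, hfnil]
        rfl
      rw [if_pos hfe, hmnil]
      simp
    · rw [if_neg hfe]
      by_cases hme : ((its.filter (fun p => PySem.Set.contains added p.2 && !PySem.Set.contains added p.1)).map Prod.fst).isEmpty
      · have hmnil := List.isEmpty_iff.mp hme
        rw [if_pos hme, hmnil, List.append_nil, pvB_loop_nil]
      · rw [if_neg hme]
        have hmnenil : (its.filter (fun p => PySem.Set.contains added p.2 && !PySem.Set.contains added p.1)).map Prod.fst ≠ [] := by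
          intro h; rw [h] at hme; exact hme rfl
        have hmsub : List.Sublist
            ((its.filter (fun p => PySem.Set.contains added p.2 && !PySem.Set.contains added p.1)).map Prod.fst)
            (its.map Prod.fst) := List.Sublist.map Prod.fst List.filter_sublist
        have hmnd := hmsub.nodup hK
        have haddsub : ∀ x, x ∈ added →
            x ∈ ((its.filter (fun p => PySem.Set.contains added p.2 && !PySem.Set.contains added p.1)).map Prod.fst).foldl PySem.Set.add added := by
          intro x hx
          exact (pv_mem_foldl_add _ added x).mpr (Or.inl hx)
        have hmoresub : ∀ x, x ∈ (its.filter (fun p => PySem.Set.contains added p.2 && !PySem.Set.contains added p.1)).map Prod.fst →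
            x ∈ ((its.filter (fun p => PySem.Set.contains added p.2 && !PySem.Set.contains added p.1)).map Prod.fst).foldl PySem.Set.add added := by
          intro x hx
          exact (pv_mem_foldl_add _ added x).mpr (Or.inr hx)
        refine ih (out ++ _) _ _ _ ⟨hmnd, hmoresub, ?_, ?_⟩ ?_
        · intro x
          rw [hseen x, pv_mem_foldl_add]
          constructor
          · rintro (hx | hx)
            · exact Or.inl ((hsa x).mp hx)
            · rcases (pv_cs_mem its children hch frontier x).mp hx with ⟨p, hpf, hm⟩
              by_cases hxa : x ∈ added
              · exact Or.inl hxa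
              · exact Or.inr ((pv_more_mem its added x).mpr ⟨p, hm, hfa p hpf, hxa⟩)
          · rintro (hx | hx)
            · exact Or.inl ((hsa x).mpr hx)
            · rcases (pv_more_mem its added x).mp hx with ⟨p, hm, hpa, hxa⟩
              have hpf : p ∈ frontier := by
                by_contra hnf
                exact hxa (hcl x p hm hpa hnf)
              exact Or.inr ((pv_cs_mem its children hch frontier x).mpr ⟨p, hpf, hm⟩)
        · intro s p hm hpa hpm
          rcases (pv_mem_foldl_add _ added p).mp hpa with hpa' | hpa'
          · by_cases hs : s ∈ added
            · exact haddsub s hs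
            · exact hmoresub s ((pv_more_mem its added s).mpr ⟨p, hm, hpa', hs⟩)
          · exact absurd hpa' hpm
        · have hlt : ((its.map Prod.fst).filter (fun k => !List.contains (List.foldl PySem.Set.add added ((its.filter (fun p => PySem.Set.contains added p.2 && !PySem.Set.contains added p.1)).map Prod.fst)) k)).length
              < ((its.map Prod.fst).filter (fun k => !List.contains added k)).length := by
            refine pv_filter_lt _ _ _ ?_ ?_
            · intro x _ hq
              simp only [Bool.not_eq_true'] at hq ⊢
              rw [pv_lcontains_false] at hq ⊢
              exact fun hx => hq (haddsub x hx)
            · rcases List.exists_mem_of_ne_nil _ hmnenil with ⟨s, hs⟩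
              rcases (pv_more_mem its added s).mp hs with ⟨p, hm, hpa, hsna⟩
              refine ⟨s, hmsub.subset hs, ?_, ?_⟩
              · simp only [Bool.not_eq_true', pv_lcontains_false]
                exact hsna
              · simp only [Bool.not_eq_true', pv_lcontains_false]
                intro hcontra
                exact hcontra (hmoresub s hs)
          omega

-- ===== VERDICT (by name: the statement is the Claim_ definition above) =====
theorem collect_descendant_span_ids_py_spec : Claim_equal_collect_descendant_span_ids_py := by
  intro step_span_id parent_of _
  unfold Spec_collect_descendant_span_ids_py collect_descendant_span_ids_py collect_descendant_span_ids_py_alt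
  dsimp only
  have hK : (((PySem.Dict.ofList parent_of).items).map Prod.fst).Nodup :=
    PySem.Dict.nodup_keys_ofList parent_of
  have hic : (PySem.List.enumerate ((PySem.Dict.ofList parent_of).items)).foldl
      (fun st p => (st.1.insert p.2.1 p.1, st.2.modify p.2.2 [] (· ++ [p.2.1])))
      ((PySem.Dict.empty : PySem.Dict String Int), (PySem.Dict.empty : PySem.Dict String (List String)))
      = ((PySem.List.enumerate ((PySem.Dict.ofList parent_of).items)).foldl
          (fun d p => PySem.Dict.insert d p.2.1 p.1) PySem.Dict.empty,
         (PySem.List.enumerate ((PySem.Dict.ofList parent_of).items)).foldl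
          (fun d p => PySem.Dict.modify d p.2.2 [] (· ++ [p.2.1])) PySem.Dict.empty) :=
    PySem.List.foldl_prod_mk
      (fun (d : PySem.Dict String Int) (p : Int × String × String) => d.insert p.2.1 p.1)
      (fun (d : PySem.Dict String (List String)) (p : Int × String × String) => d.modify p.2.2 [] (· ++ [p.2.1]))
      _ _ _
  rw [hic]
  have hch : ∀ c, ((PySem.List.enumerate ((PySem.Dict.ofList parent_of).items)).foldl
      (fun d p => PySem.Dict.modify d p.2.2 [] (· ++ [p.2.1])) PySem.Dict.empty).getD c []
      = (((PySem.Dict.ofList parent_of).items).filter (fun p => p.2 == c)).map Prod.fst :=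
    pv_children ((PySem.Dict.ofList parent_of).items)
  have hidx : ∀ s ∈ ((PySem.Dict.ofList parent_of).items).map Prod.fst,
      ((PySem.List.enumerate ((PySem.Dict.ofList parent_of).items)).foldl
        (fun d p => PySem.Dict.insert d p.2.1 p.1) PySem.Dict.empty).getD s 0
      = ((((PySem.Dict.ofList parent_of).items).map Prod.fst).idxOf s : Int) := by
    intro s hs
    rw [pv_idx ((PySem.Dict.ofList parent_of).items) 0 PySem.Dict.empty hK s hs]
    omega
  have hof : PySem.Set.ofList [step_span_id] = [step_span_id] := rfl
  have hinv : pvInv ((PySem.Dict.ofList parent_of).items) [step_span_id] [step_span_id] [step_span_id] := by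
    refine ⟨by simp, by simp, fun x => Iff.rfl, ?_⟩
    intro s p _ hp hnp
    exact absurd hp hnp
  have hbound : ((((PySem.Dict.ofList parent_of).items).map Prod.fst).filter
      (fun k => !List.contains [step_span_id] k)).length + 1
      ≤ ((PySem.Dict.ofList parent_of).items).length + 1 := by
    have h1 := List.length_filter_le (fun k => !List.contains [step_span_id] k)
      (((PySem.Dict.ofList parent_of).items).map Prod.fst)
    have h2 : (((PySem.Dict.ofList parent_of).items).map Prod.fst).length
        = ((PySem.Dict.ofList parent_of).items).length := List.length_map _
    omega
  rw [hof]
  exact pv_main ((PySem.Dict.ofList parent_of).items) hK _ _ hch hidx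
    (((PySem.Dict.ofList parent_of).items).length + 1) [step_span_id]
    [step_span_id] [step_span_id] [step_span_id] hinv hbound
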